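-- pv_equiv track=rewrite | github.com/penguin138/bioinformatics | task6/two_break_transformation.py | find_cycle_longer_than
-- ===== SOURCE A (Python) =====
-- def dfs(node, adjacency_lists, visited, cycle):
--     visited.add(node)
--     cycle.append(node)
--     for child in adjacency_lists[node]:
--         if child not in visited:
--             dfs(child, adjacency_lists, visited, cycle)
--
-- def find_cycle_longer_than(adjacency_lists, num_vertices):
--     visited = set()
--     for node in adjacency_lists:
--         if node not in visited:
--             cycle = []
--             dfs(node, adjacency_lists, visited, cycle)
--             if len(cycle) > num_vertices:
--                 return cycle
-- ===== SOURCE B (Python) =====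
-- def find_cycle_longer_than(adjacency_lists, num_vertices):
--     visited = set()
--     for node in adjacency_lists:
--         if node not in visited:
--             component = []
--             stack = [node]
--             while stack:
--                 n = stack.pop()
--                 if n in visited:
--                     continue
--                 visited.add(n)
--                 component.append(n)
--                 stack.extend(reversed(adjacency_lists[n]))
--             if len(component) > num_vertices:
--                 return component
-- ===== Notes on version B (the rewrite author's own statement) =====
-- stated objective: idiomatic
-- what changed: The recursive DFS helper is replaced by an iterative DFS with an explicit stack (pop a node, visited-check at pop time, push neighbors reversed so pop order equals recursive child order), inlined into the main loop; no helper function and no call-stack recursion.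
-- outside the precondition, e.g. on find_cycle_longer_than({0: [0], 1: [5]}, -1): A returns [0], B returns [0]
import Mathlib
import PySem

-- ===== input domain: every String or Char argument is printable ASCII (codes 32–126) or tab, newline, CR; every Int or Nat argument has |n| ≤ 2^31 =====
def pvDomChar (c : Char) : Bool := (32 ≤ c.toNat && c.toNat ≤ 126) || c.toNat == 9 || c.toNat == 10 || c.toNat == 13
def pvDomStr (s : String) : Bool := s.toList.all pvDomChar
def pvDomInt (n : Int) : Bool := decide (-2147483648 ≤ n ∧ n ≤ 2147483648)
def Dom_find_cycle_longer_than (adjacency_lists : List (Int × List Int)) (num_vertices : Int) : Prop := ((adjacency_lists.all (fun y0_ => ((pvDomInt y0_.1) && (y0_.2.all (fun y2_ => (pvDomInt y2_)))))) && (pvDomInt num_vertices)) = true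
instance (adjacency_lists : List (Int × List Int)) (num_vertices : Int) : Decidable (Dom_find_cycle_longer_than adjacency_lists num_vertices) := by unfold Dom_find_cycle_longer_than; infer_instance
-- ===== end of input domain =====

-- B replaces the recursive DFS helper by an inlined iterative DFS over an explicit stack
-- (same preorder, same visited set); no speed claim, just the idiomatic non-recursive form.
-- A mutates nothing observable to the caller; the equivalence is about the return value.

-- Shared helpers: adjacency lookup (adjacency_lists[n]; a missing key is a Python
-- KeyError, excluded by Pre_ below; the port returns [] there, a totality stand-in),
-- the universe of all vertices mentioned, and the count of unvisited universe vertices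
-- (the termination measure).
def pvAdjGet (adj : List (Int × List Int)) (n : Int) : List Int :=
  (PySem.Dict.mk adj).getD n []

def pvUniv (adj : List (Int × List Int)) : List Int :=
  adj.map Prod.fst ++ adj.flatMap Prod.snd

def pvCnt (adj : List (Int × List Int)) (v : PySem.Set Int) : Nat :=
  ((pvUniv adj).filter (fun x => !(PySem.Set.contains v x))).length

-- termination lemmas for the ports (cited by decreasing_by, hence above the ports)
theorem pvContains_add (v : PySem.Set Int) (n x : Int) :
    PySem.Set.contains (PySem.Set.add v n) x = (PySem.Set.contains v x || x == n) := by
  rw [Bool.eq_iff_iff]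
  simp only [Bool.or_eq_true, PySem.Set.contains_iff, beq_iff_eq, PySem.Set.mem_add]

theorem pvLen_filter_mono (p q : Int → Bool) (h : ∀ x, p x = true → q x = true) :
    ∀ U : List Int, (U.filter p).length ≤ (U.filter q).length := by
  intro U
  induction U with
  | nil => exact Nat.le_refl 0
  | cons x xs ih =>
    simp only [List.filter_cons]
    by_cases hp : p x = true
    · rw [if_pos hp, if_pos (h x hp)]
      exact Nat.succ_le_succ ih
    · rw [if_neg hp]
      by_cases hq : q x = true
      · rw [if_pos hq]
        exact Nat.le_succ_of_le ih
      · rw [if_neg hq]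
        exact ih

theorem pvLen_filter_lt (p q : Int → Bool) (h : ∀ x, p x = true → q x = true)
    (n : Int) (hq : q n = true) (hp : p n = false) :
    ∀ U : List Int, n ∈ U → (U.filter p).length < (U.filter q).length := by
  intro U hU
  induction U with
  | nil => simp at hU
  | cons x xs ih =>
    simp only [List.filter_cons]
    by_cases hx : x = n
    · subst hx
      rw [if_neg (by simp [hp]), if_pos hq]
      exact Nat.lt_succ_of_le (pvLen_filter_mono p q h xs)
    · have hU' : n ∈ xs := by
        rcases List.mem_cons.mp hU with h' | h'
        · exact absurd h'.symm hx
        · exact h'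
      have hlt := ih hU'
      by_cases hpx : p x = true
      · rw [if_pos hpx, if_pos (h x hpx)]
        exact Nat.succ_lt_succ hlt
      · rw [if_neg hpx]
        by_cases hqx : q x = true
        · rw [if_pos hqx]
          exact Nat.lt_succ_of_lt hlt
        · rw [if_neg hqx]
          exact hlt

theorem pvAdjGet_length_le (adj : List (Int × List Int)) (n : Int) :
    (pvAdjGet adj n).length ≤ (adj.flatMap Prod.snd).length := by
  induction adj with
  | nil => simp [pvAdjGet, PySem.Dict.getD, PySem.Dict.get?]
  | cons p rest ih =>
    obtain ⟨k, vs⟩ := p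
    simp only [pvAdjGet, PySem.Dict.getD_eq_get?_getD, PySem.Dict.get?_mk_cons,
      List.flatMap_cons, List.length_append] at *
    by_cases h : (k == n) = true
    · rw [if_pos h]
      simp only [Option.getD_some]
      omega
    · rw [if_neg h]
      omega

theorem pvAdjGet_of_not_key (adj : List (Int × List Int)) (n : Int)
    (h : n ∉ adj.map Prod.fst) : pvAdjGet adj n = [] := by
  induction adj with
  | nil => rfl
  | cons p rest ih =>
    obtain ⟨k, vs⟩ := p
    simp only [List.map_cons, List.mem_cons, not_or] at h
    simp only [pvAdjGet, PySem.Dict.getD_eq_get?_getD, PySem.Dict.get?_mk_cons] at *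
    have hk : (k == n) = false := beq_eq_false_iff_ne.mpr (fun h' => h.1 h'.symm)
    rw [hk]
    simpa using ih h.2

theorem pvCnt_add_lt (adj : List (Int × List Int)) (v : PySem.Set Int) (n : Int)
    (hn : n ∈ pvUniv adj) (hv : PySem.Set.contains v n = false) :
    pvCnt adj (PySem.Set.add v n) < pvCnt adj v := by
  unfold pvCnt
  apply pvLen_filter_lt _ _ ?h n ?hq ?hp _ hn
  case h =>
    intro x hx
    simp only [pvContains_add, Bool.not_or, Bool.and_eq_true] at hx
    exact hx.1
  case hq => show (!PySem.Set.contains v n) = true; rw [hv]; rfl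
  case hp =>
    show (!PySem.Set.contains (PySem.Set.add v n) n) = false
    rw [pvContains_add, hv]
    simp

theorem pvCnt_add_of_not_univ (adj : List (Int × List Int)) (v : PySem.Set Int) (n : Int)
    (hn : n ∉ pvUniv adj) : pvCnt adj (PySem.Set.add v n) = pvCnt adj v := by
  unfold pvCnt
  refine congrArg List.length (List.filter_congr ?_)
  intro x hx
  have hxn : (x == n : Bool) = false := beq_eq_false_iff_ne.mpr (fun h => hn (h ▸ hx))
  show (!PySem.Set.contains (PySem.Set.add v n) x) = (!PySem.Set.contains v x)
  rw [pvContains_add, hxn, Bool.or_false]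

-- ===== PORT A =====
-- A's recursive dfs; state = (visited, cycle).  'fuel' is a totality guard only: it is
-- decremented once per dfs level, and find_cycle_longer_than passes |pvUniv|+1, which
-- exceeds the recursion depth (each level visits a new universe vertex), so the 0 branch
-- is unreachable from the entry point.
mutual
def pvDfsA (adj : List (Int × List Int)) (fuel : Nat) (node : Int)
    (st : PySem.Set Int × List Int) : PySem.Set Int × List Int :=
  match fuel with
  | 0 => st
  | f + 1 =>
    -- visited.add(node); cycle.append(node); for child in adjacency_lists[node]: ...
    pvDfsChildrenA adj f (pvAdjGet adj node) (PySem.Set.add st.1 node, st.2 ++ [node])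
termination_by (fuel, 0)

def pvDfsChildrenA (adj : List (Int × List Int)) (f : Nat) (children : List Int)
    (st : PySem.Set Int × List Int) : PySem.Set Int × List Int :=
  match children with
  | [] => st
  | c :: cs =>
    if PySem.Set.contains st.1 c then pvDfsChildrenA adj f cs st
    else pvDfsChildrenA adj f cs (pvDfsA adj f c st)
termination_by (f, children.length + 1)
end

-- the 'for node in adjacency_lists' loop of A (iterates over the keys in order)
def pvFindA (adj : List (Int × List Int)) (nv : Int) :
    List (Int × List Int) → PySem.Set Int → Option (List Int)
  | [], _ => none
  | p :: rest, visited =>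
    if PySem.Set.contains visited p.1 then pvFindA adj nv rest visited
    else
      let r := pvDfsA adj ((pvUniv adj).length + 1) p.1 (visited, [])
      if (r.2.length : Int) > nv then some r.2 else pvFindA adj nv rest r.1

def find_cycle_longer_than (adjacency_lists : List (Int × List Int)) (num_vertices : Int) :
    Option (List Int) :=
  pvFindA adjacency_lists num_vertices adjacency_lists PySem.Set.empty

-- ===== PORT B =====
-- B's iterative DFS: 'while stack: n = stack.pop(); ...'.  The Lean list's head is the
-- top of the Python stack, so 'stack.extend(reversed(children))' followed by popping is
-- 'children ++ stk'.  Well-founded: each step either pops a visited node (stack shrinks)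
-- or marks a new universe vertex visited.
def pvLoopB (adj : List (Int × List Int)) (stack : List Int)
    (st : PySem.Set Int × List Int) : PySem.Set Int × List Int :=
  match stack with
  | [] => st
  | n :: stk =>
    if PySem.Set.contains st.1 n then pvLoopB adj stk st
    else pvLoopB adj (pvAdjGet adj n ++ stk) (PySem.Set.add st.1 n, st.2 ++ [n])
termination_by ((adj.flatMap Prod.snd).length + 1) * pvCnt adj st.1 + stack.length
decreasing_by
  · simp only [List.length_cons]; omega
  · rename_i hvis
    simp only [Bool.not_eq_true] at hvis
    by_cases hu : n ∈ pvUniv adj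
    · have h1 := pvCnt_add_lt adj st.1 n hu hvis
      have h2 := pvAdjGet_length_le adj n
      have h3 : ((adj.flatMap Prod.snd).length + 1) * (pvCnt adj (PySem.Set.add st.1 n) + 1)
          ≤ ((adj.flatMap Prod.snd).length + 1) * pvCnt adj st.1 :=
        Nat.mul_le_mul_left _ (by omega)
      simp only [List.length_append, List.length_cons]
      have := Nat.mul_add ((adj.flatMap Prod.snd).length + 1) (pvCnt adj (PySem.Set.add st.1 n)) 1
      omega
    · have h1 := pvCnt_add_of_not_univ adj st.1 n hu
      have h2 : pvAdjGet adj n = [] := by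
        apply pvAdjGet_of_not_key
        intro hk; exact hu (List.mem_append.mpr (Or.inl hk))
      simp only [h1, h2, List.nil_append, List.length_cons]
      omega

-- the outer 'for node in adjacency_lists' loop of B
def pvFindB (adj : List (Int × List Int)) (nv : Int) :
    List (Int × List Int) → PySem.Set Int → Option (List Int)
  | [], _ => none
  | p :: rest, visited =>
    if PySem.Set.contains visited p.1 then pvFindB adj nv rest visited
    else
      let r := pvLoopB adj [p.1] (visited, [])
      if (r.2.length : Int) > nv then some r.2 else pvFindB adj nv rest r.1

def find_cycle_longer_than_alt (adjacency_lists : List (Int × List Int)) (num_vertices : Int) :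
    Option (List Int) :=
  pvFindB adjacency_lists num_vertices adjacency_lists PySem.Set.empty

-- ===== PRECONDITION & SPEC =====
-- Pre_ excludes the inputs on which Python raises KeyError: a neighbor that is not a key
-- of adjacency_lists.  This is slightly stronger than necessary (A can return early,
-- before its traversal reaches the missing key); see claim.json "cites".
def Pre_find_cycle_longer_than (adjacency_lists : List (Int × List Int)) (num_vertices : Int) : Prop :=
  ∀ p ∈ adjacency_lists, ∀ c ∈ p.2, c ∈ adjacency_lists.map Prod.fst

instance (adjacency_lists : List (Int × List Int)) (num_vertices : Int) :
    Decidable (Pre_find_cycle_longer_than adjacency_lists num_vertices) := by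
  unfold Pre_find_cycle_longer_than; infer_instance

def pvWitness_find_cycle_longer_than : (List (Int × List Int)) × Int :=
  ([(1, [2, 3]), (2, [1]), (3, [3])], 2)

def Spec_find_cycle_longer_than (adjacency_lists : List (Int × List Int)) (num_vertices : Int) (out : Option (List Int)) : Prop := out = find_cycle_longer_than_alt adjacency_lists num_vertices
instance (adjacency_lists : List (Int × List Int)) (num_vertices : Int) (out : Option (List Int)) : Decidable (Spec_find_cycle_longer_than adjacency_lists num_vertices out) := by unfold Spec_find_cycle_longer_than; infer_instance

-- ===== CLAIM (what is proved, stated in full; the proofs are below) =====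
def Claim_equal_find_cycle_longer_than : Prop := ∀ (adjacency_lists : List (Int × List Int)) (num_vertices : Int), Dom_find_cycle_longer_than adjacency_lists num_vertices → Pre_find_cycle_longer_than adjacency_lists num_vertices → Spec_find_cycle_longer_than adjacency_lists num_vertices (find_cycle_longer_than adjacency_lists num_vertices)

-- ===== LEMMAS AND PROOFS =====

-- visited only grows through A's dfs
theorem pvDfsChildrenA_mono (adj : List (Int × List Int)) (f : Nat)
    (ih : ∀ node st x, PySem.Set.contains st.1 x = true →
      PySem.Set.contains (pvDfsA adj f node st).1 x = true) :
    ∀ ch st x, PySem.Set.contains st.1 x = true →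
      PySem.Set.contains (pvDfsChildrenA adj f ch st).1 x = true := by
  intro ch
  induction ch with
  | nil => intro st x hx; simpa [pvDfsChildrenA] using hx
  | cons c cs ihc =>
    intro st x hx
    by_cases h : PySem.Set.contains st.1 c = true
    · rw [pvDfsChildrenA, if_pos h]; exact ihc st x hx
    · rw [pvDfsChildrenA, if_neg h]; exact ihc _ x (ih c st x hx)

theorem pvDfsA_mono (adj : List (Int × List Int)) :
    ∀ f node st x, PySem.Set.contains st.1 x = true →
      PySem.Set.contains (pvDfsA adj f node st).1 x = true := by
  intro f
  induction f with
  | zero => intro node st x hx; simpa [pvDfsA] using hx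
  | succ f ih =>
    intro node st x hx
    rw [pvDfsA]
    apply pvDfsChildrenA_mono adj f ih
    rw [PySem.Set.contains_iff] at hx ⊢
    exact (PySem.Set.mem_add _ _ _).mpr (Or.inl hx)

theorem pvCnt_le_of_subset (adj : List (Int × List Int)) (v w : PySem.Set Int)
    (h : ∀ x, PySem.Set.contains v x = true → PySem.Set.contains w x = true) :
    pvCnt adj w ≤ pvCnt adj v := by
  unfold pvCnt
  apply pvLen_filter_mono
  intro x hx
  cases hcv : PySem.Set.contains v x with
  | false => simp [hcv]
  | true => exact absurd (h x hcv) (by simpa using hx)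

theorem pvCnt_le_univ (adj : List (Int × List Int)) (v : PySem.Set Int) :
    pvCnt adj v ≤ (pvUniv adj).length :=
  List.length_filter_le _ _

-- THE BRIDGE: running B's stack loop with 'node' on top (node unvisited) is running A's
-- recursive dfs on node and then the rest of the stack; proved together with the
-- children-list version, by induction on A's fuel (which exceeds the unvisited count).
theorem pvBridge (adj : List (Int × List Int)) :
    ∀ f : Nat,
      (∀ node st stk, PySem.Set.contains st.1 node = false → pvCnt adj st.1 < f →
        pvLoopB adj (node :: stk) st = pvLoopB adj stk (pvDfsA adj f node st)) ∧
      (∀ ch st stk, pvCnt adj st.1 < f →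
        pvLoopB adj (ch ++ stk) st = pvLoopB adj stk (pvDfsChildrenA adj f ch st)) := by
  intro f
  induction f with
  | zero => exact ⟨fun _ _ _ _ h => absurd h (by omega), fun _ _ _ h => absurd h (by omega)⟩
  | succ f ih =>
    have hL : ∀ node st stk, PySem.Set.contains st.1 node = false → pvCnt adj st.1 < f + 1 →
        pvLoopB adj (node :: stk) st = pvLoopB adj stk (pvDfsA adj (f + 1) node st) := by
      intro node st stk hnv hcnt
      rw [pvLoopB, if_neg (by rw [hnv]; exact Bool.false_ne_true), pvDfsA]
      by_cases hu : node ∈ pvUniv adj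
      · have hdrop := pvCnt_add_lt adj st.1 node hu hnv
        exact ih.2 (pvAdjGet adj node) (PySem.Set.add st.1 node, st.2 ++ [node]) stk
          (by simp only at hdrop ⊢; omega)
      · have h2 : pvAdjGet adj node = [] := by
          apply pvAdjGet_of_not_key
          intro hk; exact hu (List.mem_append.mpr (Or.inl hk))
        rw [h2, pvDfsChildrenA]
        rfl
    refine ⟨hL, ?_⟩
    intro ch
    induction ch with
    | nil => intro st stk _; rw [pvDfsChildrenA]; rfl
    | cons c cs ihc =>
      intro st stk hcnt
      rw [pvDfsChildrenA]
      by_cases h : PySem.Set.contains st.1 c = true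
      · rw [if_pos h, List.cons_append, pvLoopB, if_pos h]
        exact ihc st stk hcnt
      · rw [if_neg h, List.cons_append,
          hL c st (cs ++ stk) (by revert h; cases PySem.Set.contains st.1 c <;> simp) hcnt]
        apply ihc
        have hsub := pvCnt_le_of_subset adj st.1 (pvDfsA adj (f + 1) c st).1
          (fun x hx => pvDfsA_mono adj (f + 1) c st x hx)
        omega

-- one unvisited start node: B's stack loop computes A's dfs with the full fuel
theorem pvLoopB_single (adj : List (Int × List Int)) (node : Int)
    (st : PySem.Set Int × List Int) (hnv : PySem.Set.contains st.1 node = false) :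
    pvLoopB adj [node] st = pvDfsA adj ((pvUniv adj).length + 1) node st := by
  have h := (pvBridge adj ((pvUniv adj).length + 1)).1 node st [] hnv
    (Nat.lt_succ_of_le (pvCnt_le_univ adj st.1))
  rw [h, pvLoopB]

theorem pvFind_eq (adj : List (Int × List Int)) (nv : Int) :
    ∀ rest visited, pvFindA adj nv rest visited = pvFindB adj nv rest visited := by
  intro rest
  induction rest with
  | nil => intro visited; rfl
  | cons p rest ih =>
    intro visited
    rw [pvFindA, pvFindB]
    by_cases h : PySem.Set.contains visited p.1 = true
    · rw [if_pos h, if_pos h]; exact ih visited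
    · have hf : PySem.Set.contains visited p.1 = false := by
        revert h; cases PySem.Set.contains visited p.1 <;> simp
      rw [if_neg h, if_neg h, pvLoopB_single adj p.1 (visited, []) hf]
      by_cases hl : ((pvDfsA adj ((pvUniv adj).length + 1) p.1 (visited, [])).2.length : Int) > nv
      · rw [if_pos hl, if_pos hl]
      · rw [if_neg hl, if_neg hl]
        exact ih _

-- ===== VERDICT (by name: the statement is the Claim_ definition above) =====
theorem find_cycle_longer_than_spec : Claim_equal_find_cycle_longer_than := by
  intro adj nv _ _
  unfold Spec_find_cycle_longer_than find_cycle_longer_than find_cycle_longer_than_alt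
  exact pvFind_eq adj nv adj PySem.Set.empty
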